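-- pv_equiv track=rewrite | github.com/wangongyouxia/numberCheckCodeRecognizer | CheckSegmentInline.py | FirstCharEnd
-- ===== SOURCE A (Python) =====
-- def ColumnStartPoint( ary,column,heigth):
-- 	for i in  range(heigth):
-- 		if ary[i][column] == 0:
-- 			return i
-- 	return -1
--
-- def CharStart(ary,width,heigth):
-- 	for i in range(width):
-- 		if ColumnStartPoint(ary,i,heigth) != -1:
-- 			return i
-- 	return -1
--
-- def FirstCharEnd(ary,width,heigth):
-- 	startScan = CharStart(ary,width,heigth)+1
-- 	inChar = False
-- 	for i in range(startScan,width):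
-- 		if ColumnStartPoint(ary,i,heigth) == -1:
-- 			if inChar == True:
-- 				return i-1
-- 		else:
-- 			inChar = True
-- 	return -1
-- ===== SOURCE B (Python) =====
-- def FirstCharEnd(ary, width, heigth):
--     # one row-major pass builds a column-occupancy table, then three index lookups
--     full = [False] * max(width, 0)
--     for r in range(heigth):
--         row = ary[r]
--         for c in range(width):
--             if row[c] == 0:
--                 full[c] = True
--     try:
--         f = full.index(True)            # first column of the first character
--         g = full.index(True, f + 1)     # first occupied column after it
--         e = full.index(False, g + 1)    # first gap after that
--     except ValueError:
--         return -1
--     return e - 1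
-- ===== Notes on version B (the rewrite author's own statement) =====
-- stated objective: alternative
-- what changed: Replaces A's per-column pixel re-scans through the ColumnStartPoint helper and its inChar state machine with one row-major pass that builds a column-occupancy table followed by three index() lookups (first occupied column, next occupied column, next gap).
-- outside the precondition, e.g. on FirstCharEnd([[0, 1, 0, 1]], 5, 1): A returns 2, B raises IndexError; on FirstCharEnd([[0]], 1, 3): A returns -1, B raises IndexError
import Mathlib
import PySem

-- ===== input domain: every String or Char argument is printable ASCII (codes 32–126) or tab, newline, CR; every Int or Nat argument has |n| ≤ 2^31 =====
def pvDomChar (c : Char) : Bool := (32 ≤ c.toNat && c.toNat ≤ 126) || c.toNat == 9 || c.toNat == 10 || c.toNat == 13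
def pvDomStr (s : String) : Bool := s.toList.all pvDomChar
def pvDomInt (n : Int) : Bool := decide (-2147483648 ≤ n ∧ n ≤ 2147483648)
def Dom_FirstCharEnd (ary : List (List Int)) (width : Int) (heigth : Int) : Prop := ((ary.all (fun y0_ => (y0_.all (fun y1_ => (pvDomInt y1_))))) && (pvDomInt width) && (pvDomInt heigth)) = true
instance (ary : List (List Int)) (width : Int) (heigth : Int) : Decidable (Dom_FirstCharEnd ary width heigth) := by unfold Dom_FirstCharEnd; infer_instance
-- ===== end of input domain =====

-- B replaces A's per-column re-scans (ColumnStartPoint helper + inChar state machine) by one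
-- row-major pass building a column-occupancy table and three index() lookups; same cost class.

-- ===== PORT A =====
-- ColumnStartPoint's loop (out-of-range cells use default 1, a nonzero pixel; unreachable under Pre_)
def pvColLoop (ary : List (List Int)) (column : Int) : List Int → Int
  | [] => -1
  | i :: rest =>
      if PySem.List.pyGetD (PySem.List.pyGetD ary i []) column 1 == 0 then i
      else pvColLoop ary column rest

def ColumnStartPoint (ary : List (List Int)) (column : Int) (heigth : Int) : Int :=
  pvColLoop ary column (PySem.List.pyRange 0 heigth 1)

def pvCharStartLoop (ary : List (List Int)) (heigth : Int) : List Int → Int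
  | [] => -1
  | i :: rest =>
      if ColumnStartPoint ary i heigth != -1 then i
      else pvCharStartLoop ary heigth rest

def CharStart (ary : List (List Int)) (width : Int) (heigth : Int) : Int :=
  pvCharStartLoop ary heigth (PySem.List.pyRange 0 width 1)

def pvFceLoop (ary : List (List Int)) (heigth : Int) : List Int → Bool → Int
  | [], _ => -1
  | i :: rest, inChar =>
      if ColumnStartPoint ary i heigth == -1 then
        if inChar then i - 1 else pvFceLoop ary heigth rest inChar
      else pvFceLoop ary heigth rest true

def FirstCharEnd (ary : List (List Int)) (width : Int) (heigth : Int) : Int :=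
  let startScan := CharStart ary width heigth + 1
  pvFceLoop ary heigth (PySem.List.pyRange startScan width 1) false

-- ===== PORT B =====
-- inner loop: mark the occupied columns of one row in the table
def pvMarkRow (row : List Int) (width : Int) (full : List Bool) : List Bool :=
  (PySem.List.pyRange 0 width 1).foldl
    (fun f c => if PySem.List.pyGetD row c 1 == 0 then f.set c.toNat true else f) full

-- row-major build of full = [any(ary[r][c]==0 for r in range(heigth)) for c in range(width)]
def pvBuildFull (ary : List (List Int)) (width : Int) (heigth : Int) : List Bool :=
  (PySem.List.pyRange 0 heigth 1).foldl
    (fun full r => pvMarkRow (PySem.List.pyGetD ary r []) width full)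
    (List.replicate (max width 0).toNat false)

-- xs.index(target, start): position of first `target` at or after `start`
def pvIndexFrom (xs : List Bool) (target : Bool) (start : Nat) : Option Nat :=
  ((xs.drop start).findIdx? (· == target)).map (fun k => start + k)

def FirstCharEnd_alt (ary : List (List Int)) (width : Int) (heigth : Int) : Int :=
  let full := pvBuildFull ary width heigth
  match pvIndexFrom full true 0 with
  | none => -1
  | some f =>
    match pvIndexFrom full true (f + 1) with
    | none => -1
    | some g =>
      match pvIndexFrom full false (g + 1) with
      | none => -1
      | some e => (e : Int) - 1

-- ===== PRECONDITION & SPEC =====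
-- Pre_ excludes inputs where indexing ary[r][c] (r < heigth, c < width) can leave the array:
-- there Python A raises, or returns only by an early exit that B's full table build cannot
-- reproduce (B raises IndexError on those ragged/short arrays).
def Pre_FirstCharEnd (ary : List (List Int)) (width : Int) (heigth : Int) : Prop :=
  heigth ≤ (ary.length : Int) ∧ ∀ row ∈ ary.take heigth.toNat, width ≤ (row.length : Int)

instance (ary : List (List Int)) (width : Int) (heigth : Int) : Decidable (Pre_FirstCharEnd ary width heigth) := by
  unfold Pre_FirstCharEnd; infer_instance

def pvWitness_FirstCharEnd : List (List Int) × Int × Int := ([[1, 0], [1, 1]], 2, 2)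

def Spec_FirstCharEnd (ary : List (List Int)) (width : Int) (heigth : Int) (out : Int) : Prop := out = FirstCharEnd_alt ary width heigth
instance (ary : List (List Int)) (width : Int) (heigth : Int) (out : Int) : Decidable (Spec_FirstCharEnd ary width heigth out) := by unfold Spec_FirstCharEnd; infer_instance

-- ===== CLAIM (what is proved, stated in full; the proofs are below) =====
def Claim_equal_FirstCharEnd : Prop := ∀ (ary : List (List Int)) (width : Int) (heigth : Int), Dom_FirstCharEnd ary width heigth → Pre_FirstCharEnd ary width heigth → Spec_FirstCharEnd ary width heigth (FirstCharEnd ary width heigth)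

-- ===== LEMMAS AND PROOFS =====

-- column c holds a zero pixel in the first `heigth` rows (out-of-range cells default to 1)
def pvOcc (ary : List (List Int)) (heigth : Int) (c : Int) : Bool :=
  (PySem.List.pyRange 0 heigth 1).any
    (fun r => PySem.List.pyGetD (PySem.List.pyGetD ary r []) c 1 == 0)

-- abstract form of A's inChar state machine over a boolean column list starting at `pos`
def pvScan (pos : Int) : List Bool → Bool → Int
  | [], _ => -1
  | b :: rest, inChar =>
      if b then pvScan (pos + 1) rest true
      else if inChar then pos - 1
      else pvScan (pos + 1) rest inChar

theorem pvColLoop_eq_neg_one (ary : List (List Int)) (column : Int) (xs : List Int)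
    (h0 : ∀ i ∈ xs, 0 ≤ i) :
    (pvColLoop ary column xs = -1) ↔
      xs.any (fun i => PySem.List.pyGetD (PySem.List.pyGetD ary i []) column 1 == 0) = false := by
  induction xs with
  | nil => simp [pvColLoop]
  | cons i rest ih =>
    have hi : 0 ≤ i := h0 i (by simp)
    by_cases hc : PySem.List.pyGetD (PySem.List.pyGetD ary i []) column 1 == 0
    · simp [pvColLoop, hc]; omega
    · simp [pvColLoop, hc, ih (fun j hj => h0 j (by simp [hj]))]

theorem pvCSP_eq_neg_one (ary : List (List Int)) (c heigth : Int) :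
    (ColumnStartPoint ary c heigth = -1) ↔ pvOcc ary heigth c = false := by
  unfold ColumnStartPoint pvOcc
  exact pvColLoop_eq_neg_one ary c _ (fun i hi => ((PySem.List.mem_pyRange_one).mp hi).1)

theorem pvScan_true (bs : List Bool) : ∀ pos : Int,
    pvScan pos bs true =
      match bs.findIdx? (fun x => !x) with
      | none => -1
      | some k => pos + (k : Int) - 1 := by
  induction bs with
  | nil => intro pos; simp [pvScan]
  | cons b rest ih =>
    intro pos
    cases b with
    | false => simp [pvScan, List.findIdx?_cons]
    | true =>
      simp only [pvScan, if_true, List.findIdx?_cons, Bool.not_true, Bool.false_eq_true,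
        if_false, ih (pos + 1)]
      cases hf : rest.findIdx? (fun x => !x) with
      | none => simp
      | some k => simp; ring


theorem pvScan_false (bs : List Bool) : ∀ pos : Int,
    pvScan pos bs false =
      match bs.findIdx? (fun x => x) with
      | none => -1
      | some g =>
        match (bs.drop (g + 1)).findIdx? (fun x => !x) with
        | none => -1
        | some k => pos + (g : Int) + 1 + (k : Int) - 1 := by
  induction bs with
  | nil => intro pos; simp [pvScan]
  | cons b rest ih =>
    intro pos
    cases b with
    | true =>
      simp only [pvScan, if_true, List.findIdx?_cons, List.drop_succ_cons,
        pvScan_true rest (pos + 1)]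
      cases hf : rest.findIdx? (fun x => !x) with
      | none => simp [hf]
      | some k => simp [hf]
    | false =>
      simp only [pvScan, Bool.false_eq_true, if_false, List.findIdx?_cons, ih (pos + 1)]
      cases hg : rest.findIdx? (fun x => x) with
      | none => simp
      | some g =>
        simp only [Option.map_some, List.drop_succ_cons]
        cases hf : (rest.drop (g + 1)).findIdx? (fun x => !x) with
        | none => simp
        | some k => simp; ring

theorem pvSet_map_range (g : Int → Bool) (s w : Int) (h0 : 0 ≤ s) :
    ((PySem.List.pyRange 0 w 1).map g).set s.toNat true =
      (PySem.List.pyRange 0 w 1).map (fun c => if c = s then true else g c) := by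
  apply List.ext_getElem
  · simp
  · intro j hj hj2
    simp only [List.getElem_set, List.getElem_map, PySem.List.getElem_pyRange_one]
    simp only [List.length_set, List.length_map, PySem.List.length_pyRange_one] at hj
    split_ifs with h2 h3 h3
    · rfl
    · exfalso; omega
    · exfalso; omega
    · rfl


theorem pvMark_aux (row : List Int) (w : Int) :
    ∀ (n : ℕ) (s : Int), 0 ≤ s → (w - s).toNat = n → ∀ g : Int → Bool,
      (PySem.List.pyRange s w 1).foldl
        (fun f c => if PySem.List.pyGetD row c 1 == 0 then f.set c.toNat true else f)
        ((PySem.List.pyRange 0 w 1).map g) =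
      (PySem.List.pyRange 0 w 1).map
        (fun c => g c || (decide (s ≤ c) && (PySem.List.pyGetD row c 1 == 0))) := by
  intro n
  induction n with
  | zero =>
    intro s hs hn g
    rw [PySem.List.pyRange_one_eq_nil (a := s) (b := w) (by omega)]
    simp only [List.foldl_nil]
    apply List.map_congr_left
    intro c hc
    have := (PySem.List.mem_pyRange_one.mp hc)
    have : ¬ (s ≤ c) := by omega
    simp [this]
  | succ n ih =>
    intro s hs hn g
    rw [PySem.List.pyRange_one_cons (a := s) (b := w) (by omega)]
    simp only [List.foldl_cons]
    by_cases hp : PySem.List.pyGetD row s 1 == 0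
    · rw [if_pos hp, pvSet_map_range g s w hs]
      rw [ih (s + 1) (by omega) (by omega)]
      apply List.map_congr_left
      intro c hc
      have hcm := PySem.List.mem_pyRange_one.mp hc
      by_cases hcs : c = s
      · subst hcs; simp [hp]
      · have h1 : (decide (s + 1 ≤ c) = decide (s ≤ c)) ∨ (¬ s ≤ c) := by
          by_cases h : s ≤ c
          · left; have : s + 1 ≤ c := by omega
            simp [this, h]
          · right; exact h
        simp only [if_neg hcs]
        rcases h1 with h1 | h1
        · rw [h1]
        · simp [h1]; omega
    · rw [if_neg hp]
      rw [ih (s + 1) (by omega) (by omega)]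
      apply List.map_congr_left
      intro c hc
      by_cases hcs : c = s
      · subst hcs
        simp [Bool.eq_false_iff.mpr (fun h => hp h)]
      · by_cases h : s ≤ c
        · have : s + 1 ≤ c := by omega
          simp [this, h]
        · have h2 : ¬ (s + 1 ≤ c) := by omega
          simp [h, h2]


theorem pvMarkRow_map (row : List Int) (w : Int) (g : Int → Bool) :
    pvMarkRow row w ((PySem.List.pyRange 0 w 1).map g) =
      (PySem.List.pyRange 0 w 1).map
        (fun c => g c || (PySem.List.pyGetD row c 1 == 0)) := by
  unfold pvMarkRow
  rw [pvMark_aux row w (w - 0).toNat 0 le_rfl rfl g]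
  apply List.map_congr_left
  intro c hc
  have := PySem.List.mem_pyRange_one.mp hc
  simp [this.1]

theorem pvBuild_aux (ary : List (List Int)) (w h : Int) :
    ∀ (n : ℕ) (s : Int), (h - s).toNat = n → ∀ g : Int → Bool,
      (PySem.List.pyRange s h 1).foldl
        (fun full r => pvMarkRow (PySem.List.pyGetD ary r []) w full)
        ((PySem.List.pyRange 0 w 1).map g) =
      (PySem.List.pyRange 0 w 1).map
        (fun c => g c || (PySem.List.pyRange s h 1).any
            (fun r => PySem.List.pyGetD (PySem.List.pyGetD ary r []) c 1 == 0)) := by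
  intro n
  induction n with
  | zero =>
    intro s hn g
    rw [PySem.List.pyRange_one_eq_nil (a := s) (b := h) (by omega)]
    simp
  | succ n ih =>
    intro s hn g
    rw [PySem.List.pyRange_one_cons (a := s) (b := h) (by omega)]
    simp only [List.foldl_cons, List.any_cons]
    rw [pvMarkRow_map, ih (s + 1) (by omega)]
    apply List.map_congr_left
    intro c hc
    simp [Bool.or_assoc]


theorem pvBuildFull_eq (ary : List (List Int)) (w h : Int) :
    pvBuildFull ary w h = (PySem.List.pyRange 0 w 1).map (pvOcc ary h) := by
  unfold pvBuildFull
  have hrep : List.replicate (max w 0).toNat false =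
      (PySem.List.pyRange 0 w 1).map (fun _ => false) := by
    rw [List.map_const', PySem.List.length_pyRange_one]
    congr 1
    omega
  rw [hrep, pvBuild_aux ary w h (h - 0).toNat 0 rfl]
  apply List.map_congr_left
  intro c hc
  simp [pvOcc]

theorem pvFce_eq_scan (ary : List (List Int)) (heigth : Int) :
    ∀ (n : ℕ) (s w : Int), (w - s).toNat = n → ∀ inChar,
      pvFceLoop ary heigth (PySem.List.pyRange s w 1) inChar =
        pvScan s ((PySem.List.pyRange s w 1).map (pvOcc ary heigth)) inChar := by
  intro n
  induction n with
  | zero =>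
    intro s w hn inChar
    rw [PySem.List.pyRange_one_eq_nil (a := s) (b := w) (by omega)]
    simp [pvFceLoop, pvScan]
  | succ n ih =>
    intro s w hn inChar
    rw [PySem.List.pyRange_one_cons (a := s) (b := w) (by omega)]
    simp only [List.map_cons]
    by_cases ho : pvOcc ary heigth s = true
    · have hcsp : ¬ (ColumnStartPoint ary s heigth = -1) := by
        rw [pvCSP_eq_neg_one]; simp [ho]
      simp only [pvFceLoop, pvScan, ho, if_true, beq_iff_eq, if_neg hcsp]
      exact ih (s + 1) w (by omega) true
    · have ho' : pvOcc ary heigth s = false := by simpa using ho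
      have hcsp : ColumnStartPoint ary s heigth = -1 := (pvCSP_eq_neg_one _ _ _).mpr ho'
      simp only [pvFceLoop, pvScan, ho', beq_iff_eq, if_pos hcsp, Bool.false_eq_true, if_false]
      cases inChar with
      | true => simp
      | false => simpa using ih (s + 1) w (by omega) false


theorem pvCharStart_eq (ary : List (List Int)) (heigth : Int) :
    ∀ (n : ℕ) (s w : Int), 0 ≤ s → (w - s).toNat = n →
      pvCharStartLoop ary heigth (PySem.List.pyRange s w 1) =
        match ((PySem.List.pyRange s w 1).map (pvOcc ary heigth)).findIdx? (fun x => x) with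
        | none => -1
        | some k => s + (k : Int) := by
  intro n
  induction n with
  | zero =>
    intro s w hs hn
    rw [PySem.List.pyRange_one_eq_nil (a := s) (b := w) (by omega)]
    simp [pvCharStartLoop]
  | succ n ih =>
    intro s w hs hn
    rw [PySem.List.pyRange_one_cons (a := s) (b := w) (by omega)]
    simp only [List.map_cons, List.findIdx?_cons]
    by_cases ho : pvOcc ary heigth s = true
    · have hcsp : ¬ (ColumnStartPoint ary s heigth = -1) := by
        rw [pvCSP_eq_neg_one]; simp [ho]
      have hne : (ColumnStartPoint ary s heigth != -1) = true := by
        simp [hcsp]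
      simp [pvCharStartLoop, hne, ho]
    · have ho' : pvOcc ary heigth s = false := by simpa using ho
      have hcsp : ColumnStartPoint ary s heigth = -1 := (pvCSP_eq_neg_one _ _ _).mpr ho'
      have hne : (ColumnStartPoint ary s heigth != -1) = false := by
        simp [hcsp]
      simp only [pvCharStartLoop, hne, Bool.false_eq_true, if_false, ho']
      rw [ih (s + 1) w (by omega) (by omega)]
      cases hf : ((PySem.List.pyRange (s+1) w 1).map (pvOcc ary heigth)).findIdx? (fun x => x) with
      | none => simp
      | some k => simp; ring

-- ===== VERDICT (by name: the statement is the Claim_ definition above) =====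
theorem FirstCharEnd_spec : Claim_equal_FirstCharEnd := by
  intro ary width heigth _ _
  unfold Spec_FirstCharEnd FirstCharEnd FirstCharEnd_alt CharStart
  rw [pvBuildFull_eq]
  have hbeqt : (fun (x : Bool) => x == true) = (fun x => x) := by funext x; cases x <;> rfl
  have hbeqf : (fun (x : Bool) => x == false) = (fun x => !x) := by funext x; cases x <;> rfl
  simp only [pvIndexFrom, hbeqt, hbeqf, List.drop_zero]
  rw [pvCharStart_eq ary heigth (width - 0).toNat 0 width le_rfl rfl]
  cases hf : ((PySem.List.pyRange 0 width 1).map (pvOcc ary heigth)).findIdx? (fun x => x) with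
  | none =>
    simp only [Option.map_none]
    rw [show (-1 : Int) + 1 = 0 by ring]
    rw [pvFce_eq_scan ary heigth (width - 0).toNat 0 width rfl false]
    rw [pvScan_false]
    simp only [hf]
  | some f =>
    simp only [Option.map_some, Nat.zero_add]
    have hflen : f < width.toNat := by
      have := (List.findIdx?_eq_some_iff_findIdx_eq.mp hf).1
      simpa using this
    have hf1w : (f : Int) + 1 ≤ width := by omega
    have hsplit : PySem.List.pyRange 0 width 1 =
        PySem.List.pyRange 0 ((f : Int) + 1) 1 ++ PySem.List.pyRange ((f : Int) + 1) width 1 :=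
      PySem.List.pyRange_one_append 0 ((f : Int) + 1) width (by omega) hf1w
    have hdrop : ((PySem.List.pyRange 0 width 1).map (pvOcc ary heigth)).drop (f + 1) =
        (PySem.List.pyRange ((f : Int) + 1) width 1).map (pvOcc ary heigth) := by
      rw [hsplit, List.map_append]
      have hlen : ((PySem.List.pyRange 0 ((f : Int) + 1) 1).map (pvOcc ary heigth)).length = f + 1 := by
        simp [PySem.List.length_pyRange_one]
      rw [← hlen, List.drop_left]
    rw [show (0 : Int) + (f : Int) + 1 = ((f : Int) + 1) by ring]
    rw [pvFce_eq_scan ary heigth (width - ((f : Int) + 1)).toNat ((f : Int) + 1) width rfl false]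
    rw [pvScan_false, ← hdrop]
    cases hg : (((PySem.List.pyRange 0 width 1).map (pvOcc ary heigth)).drop (f + 1)).findIdx? (fun x => x) with
    | none => simp only [Option.map_none]
    | some g =>
      simp only [Option.map_some]
      have hdd : (((PySem.List.pyRange 0 width 1).map (pvOcc ary heigth)).drop (f + 1)).drop (g + 1) =
          ((PySem.List.pyRange 0 width 1).map (pvOcc ary heigth)).drop (f + 1 + g + 1) := by
        rw [List.drop_drop]
        congr 1
      rw [hdd]
      cases he : (((PySem.List.pyRange 0 width 1).map (pvOcc ary heigth)).drop (f + 1 + g + 1)).findIdx? (fun x => !x) with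
      | none => simp only [Option.map_none]
      | some k =>
        simp only [Option.map_some]
        push_cast
        ring
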